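-- pv_equiv track=rewrite | github.com/Yushi-Y/Leetcode | Interviews/Visa.py | compute_rating_level
-- ===== SOURCE A (Python) =====
-- def compute_rating_level(initial_rating, changes):
--     rating = initial_rating
--
--     for change in changes:
--         rating += change
--
--     if rating < 1000:
--         return "beginner"
--
--     elif rating < 1500:
--         return "intermediate"
--
--     elif rating < 2000:
--         return "advanced"
--
--     else:
--         return "pro"
-- ===== SOURCE B (Python) =====
-- _LABELS = ("beginner", "intermediate", "advanced", "pro")
--
-- def _total(xs):
--     # divide-and-conquer summation: split in half, sum each half recursively
--     n = len(xs)
--     if n == 0: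
--         return 0
--     if n == 1:
--         return xs[0]
--     m = n // 2
--     return _total(xs[:m]) + _total(xs[m:])
--
-- def compute_rating_level(initial_rating, changes):
--     rating = initial_rating + _total(changes)
--     # label index = how many of the thresholds 1000/1500/2000 the rating reached
--     return _LABELS[(rating >= 1000) + (rating >= 1500) + (rating >= 2000)]
-- ===== Notes on version B (the rewrite author's own statement) =====
-- stated objective: alternative
-- what changed: Sums the changes by balanced divide-and-conquer over list halves instead of a left-to-right accumulation loop, and replaces the if-elif ladder with arithmetic indexing (the label index is the count of thresholds 1000/1500/2000 reached).
import Mathlib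
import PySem

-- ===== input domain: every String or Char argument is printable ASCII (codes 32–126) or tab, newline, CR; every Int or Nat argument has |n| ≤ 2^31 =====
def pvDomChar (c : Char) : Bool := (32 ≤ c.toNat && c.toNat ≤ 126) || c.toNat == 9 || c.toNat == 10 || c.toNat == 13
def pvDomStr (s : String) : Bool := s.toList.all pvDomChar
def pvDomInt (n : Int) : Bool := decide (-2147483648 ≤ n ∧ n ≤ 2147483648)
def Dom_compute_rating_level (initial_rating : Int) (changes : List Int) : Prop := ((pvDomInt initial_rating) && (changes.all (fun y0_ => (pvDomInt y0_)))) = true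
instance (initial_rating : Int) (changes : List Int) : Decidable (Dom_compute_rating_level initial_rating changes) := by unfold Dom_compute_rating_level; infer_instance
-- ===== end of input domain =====

-- B sums the changes by balanced divide-and-conquer over list halves (instead of A's left-to-right loop) and indexes the label table by the count of thresholds reached (instead of the if-elif ladder); alternative decomposition, same result.


-- ===== PORT A =====
def compute_rating_level (initial_rating : Int) (changes : List Int) : String :=
  let rating := changes.foldl (fun rating change => rating + change) initial_rating
  if rating < 1000 then "beginner"
  else if rating < 1500 then "intermediate"
  else if rating < 2000 then "advanced"
  else "pro"

-- ===== PORT B =====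
-- _total: divide-and-conquer summation over list halves (xs[0] in the n == 1 branch is in range, ported as getD)
def pvTotal (xs : List Int) : Int :=
  let n := xs.length
  if n = 0 then 0
  else if n = 1 then xs.getD 0 0
  else
    let m := n / 2
    pvTotal (xs.take m) + pvTotal (xs.drop m)
termination_by xs.length
decreasing_by
  · simp; omega
  · simp; omega

def pvLabels : List String := ["beginner", "intermediate", "advanced", "pro"]

def compute_rating_level_alt (initial_rating : Int) (changes : List Int) : String :=
  let rating := initial_rating + pvTotal changes
  let idx : Nat :=
    (if 1000 ≤ rating then 1 else 0) +
    (if 1500 ≤ rating then 1 else 0) +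
    (if 2000 ≤ rating then 1 else 0)
  pvLabels.getD idx ""

-- ===== PRECONDITION & SPEC =====
def Spec_compute_rating_level (initial_rating : Int) (changes : List Int) (out : String) : Prop := out = compute_rating_level_alt initial_rating changes
instance (initial_rating : Int) (changes : List Int) (out : String) : Decidable (Spec_compute_rating_level initial_rating changes out) := by unfold Spec_compute_rating_level; infer_instance

-- ===== CLAIM (what is proved, stated in full; the proofs are below) =====
def Claim_equal_compute_rating_level : Prop := ∀ (initial_rating : Int) (changes : List Int), Dom_compute_rating_level initial_rating changes → Spec_compute_rating_level initial_rating changes (compute_rating_level initial_rating changes)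

-- ===== LEMMAS AND PROOFS =====
theorem pvTotal_eq_sum (xs : List Int) : pvTotal xs = xs.sum := by
  induction hn : xs.length using Nat.strong_induction_on generalizing xs with
  | _ n ih =>
    rw [pvTotal]
    simp only [hn]
    split_ifs with h0 h1
    · subst h0; rw [List.length_eq_zero_iff.mp hn]; rfl
    · obtain ⟨a, ha⟩ := List.length_eq_one_iff.mp (hn.trans h1)
      subst ha; simp [List.getD]
    · have h2 : 2 ≤ n := by omega
      have hm1 : (xs.take (n / 2)).length = n / 2 := by
        simp [hn]; omega
      have hm2 : (xs.drop (n / 2)).length = n - n / 2 := by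
        simp [hn]
      rw [ih (n / 2) (by omega) _ hm1, ih (n - n / 2) (by omega) _ hm2]
      rw [← List.sum_append, List.take_append_drop]

theorem pv_foldl_add (init : Int) (xs : List Int) :
    xs.foldl (fun rating change => rating + change) init = init + xs.sum := by
  induction xs generalizing init with
  | nil => simp
  | cons y ys ih => simp [List.foldl, ih, List.sum_cons]; ring

theorem pv_classify (r : Int) :
    (if r < 1000 then "beginner"
     else if r < 1500 then "intermediate"
     else if r < 2000 then "advanced"
     else "pro")
    = pvLabels.getD
        ((if 1000 ≤ r then 1 else 0) + (if 1500 ≤ r then 1 else 0) + (if 2000 ≤ r then 1 else 0)) "" := by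
  split_ifs <;> first | rfl | omega

-- ===== VERDICT (by name: the statement is the Claim_ definition above) =====
theorem compute_rating_level_spec : Claim_equal_compute_rating_level := by
  intro ir cs _
  unfold Spec_compute_rating_level compute_rating_level compute_rating_level_alt
  rw [pvTotal_eq_sum, pv_foldl_add]
  exact pv_classify (ir + cs.sum)
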